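-- pv_equiv track=rewrite | github.com/Chukwudebelu/HackerRank | Python/Built-Ins/ginortS/ginortS4.py | ginortS
-- ===== SOURCE A (Python) =====
-- def ginortS(s: str) -> str:
--   """
--   Sort the input string according to the given constraints:
--   1st group: LOWERCASE characters
--   2nd group: UPPERCASE characters
--   3rd group: ODD integers
--   4th group: EVEN integers
--   """
--   lower, upper, odd, even = [list() for _ in range(4)]
--
--   for i in s:
--     if 'a' <= i <= 'z':
--       lower.append(i)
--     elif 'A' <= i <= 'Z':
--       upper.append(i)
--     elif int(i) % 2:
--       odd.append(i)
--     else: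
--       even.append(i)
--
--   lower, upper, odd, even = map(sorted, [lower, upper, odd, even])
--
--   return ''.join([*lower, *upper, *odd, *even])
-- ===== SOURCE B (Python) =====
-- def ginortS(s: str) -> str:
--   """Counting sort over the fixed 62-character alphabet: one pass to count,
--   then emit each group's characters in its fixed order."""
--   counts = {}
--   for c in s:
--     counts[c] = counts.get(c, 0) + 1
--   order = "abcdefghijklmnopqrstuvwxyz" "ABCDEFGHIJKLMNOPQRSTUVWXYZ" "13579" "02468"
--   return ''.join(c * counts.get(c, 0) for c in order)
-- ===== Notes on version B (the rewrite author's own statement) =====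
-- stated objective: faster
-- what changed: Replaces partition-then-comparison-sort (sorted on each of four buckets) by a counting sort: one pass builds a character counter, then the output is emitted by replicating each of the 62 alphabet characters in fixed group order.
import Mathlib
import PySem

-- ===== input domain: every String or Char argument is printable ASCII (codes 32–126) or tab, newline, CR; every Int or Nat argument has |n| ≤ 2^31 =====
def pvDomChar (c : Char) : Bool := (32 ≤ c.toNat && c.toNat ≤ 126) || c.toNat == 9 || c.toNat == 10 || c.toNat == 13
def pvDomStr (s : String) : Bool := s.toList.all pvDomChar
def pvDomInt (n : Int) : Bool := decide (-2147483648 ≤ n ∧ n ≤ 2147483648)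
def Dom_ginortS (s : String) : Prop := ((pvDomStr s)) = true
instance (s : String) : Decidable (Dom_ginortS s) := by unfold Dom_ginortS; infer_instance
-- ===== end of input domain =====

-- B replaces A's partition + four comparison sorts by a counting sort over the fixed
-- 62-character alphabet (one counting pass, then emission in group order).

-- ===== PORT A =====
-- loop body of A's for-loop (the four append branches; int(i) % 2 via PySem.Int.ofStr?,
-- whose 'none' marks exactly Python's ValueError — those inputs are outside Pre_)
def stepA (acc : List Char × List Char × List Char × List Char) (c : Char) :
    List Char × List Char × List Char × List Char :=
  if 'a' ≤ c ∧ c ≤ 'z' then (acc.1 ++ [c], acc.2.1, acc.2.2.1, acc.2.2.2)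
  else if 'A' ≤ c ∧ c ≤ 'Z' then (acc.1, acc.2.1 ++ [c], acc.2.2.1, acc.2.2.2)
  else
    match PySem.Int.ofStr? (String.mk [c]) with
    | some n =>
        if PySem.Int.mod n 2 ≠ 0 then (acc.1, acc.2.1, acc.2.2.1 ++ [c], acc.2.2.2)
        else (acc.1, acc.2.1, acc.2.2.1, acc.2.2.2 ++ [c])
    | none => acc   -- int(i) raises ValueError: excluded by Pre_ginortS

def ginortS (s : String) : String :=
  let r := s.toList.foldl stepA ([], [], [], [])
  String.mk (PySem.List.sorted r.1 (fun x => x) false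
          ++ PySem.List.sorted r.2.1 (fun x => x) false
          ++ PySem.List.sorted r.2.2.1 (fun x => x) false
          ++ PySem.List.sorted r.2.2.2 (fun x => x) false)

-- ===== PORT B =====
def ginortS_alt (s : String) : String :=
  let counts := s.toList.foldl (fun d c => d.insert c (d.getD c 0 + 1))
                  (PySem.Dict.empty : PySem.Dict Char Int)
  String.mk ((("abcdefghijklmnopqrstuvwxyz" ++ "ABCDEFGHIJKLMNOPQRSTUVWXYZ"
               ++ "13579" ++ "02468").toList).flatMap
    (fun c => List.replicate (counts.getD c 0).toNat c))

-- ===== PRECONDITION & SPEC =====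
-- Pre_ excludes exactly the strings on which A raises ValueError (int(i) on a
-- character that is neither a letter nor a digit).
def Pre_ginortS (s : String) : Prop :=
  s.toList.all (fun c => (97 ≤ c.toNat && c.toNat ≤ 122) || (65 ≤ c.toNat && c.toNat ≤ 90)
    || (48 ≤ c.toNat && c.toNat ≤ 57)) = true
instance (s : String) : Decidable (Pre_ginortS s) := by unfold Pre_ginortS; infer_instance
def pvWitness_ginortS : String := "Sorting1234"

def Spec_ginortS (s : String) (out : String) : Prop := out = ginortS_alt s
instance (s : String) (out : String) : Decidable (Spec_ginortS s out) := by unfold Spec_ginortS; infer_instance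

-- ===== CLAIM (what is proved, stated in full; the proofs are below) =====
def Claim_equal_ginortS : Prop := ∀ (s : String), Dom_ginortS s → Pre_ginortS s → Spec_ginortS s (ginortS s)

-- ===== LEMMAS AND PROOFS =====

def lowChars : List Char :=
  ['a','b','c','d','e','f','g','h','i','j','k','l','m','n','o','p','q','r','s','t','u','v','w','x','y','z']
def upChars : List Char :=
  ['A','B','C','D','E','F','G','H','I','J','K','L','M','N','O','P','Q','R','S','T','U','V','W','X','Y','Z']
def oddChars : List Char := ['1','3','5','7','9']
def evenChars : List Char := ['0','2','4','6','8']

def fL (c : Char) : Bool := decide ('a' ≤ c ∧ c ≤ 'z')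
def fU (c : Char) : Bool := !fL c && decide ('A' ≤ c ∧ c ≤ 'Z')
def fO (c : Char) : Bool := decide (c ∈ oddChars)
def fE (c : Char) : Bool := decide (c ∈ evenChars)

lemma mem_lowChars (c : Char) (h1 : 'a' ≤ c) (h2 : c ≤ 'z') : c ∈ lowChars := by
  have h1' : 97 ≤ c.toNat := h1
  have h2' : c.toNat ≤ 122 := h2
  have hc : c = Char.ofNat c.toNat := (Char.ofNat_toNat c).symm
  interval_cases h : c.toNat <;> (rw [hc]; decide)

lemma mem_upChars (c : Char) (h1 : 'A' ≤ c) (h2 : c ≤ 'Z') : c ∈ upChars := by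
  have h1' : 65 ≤ c.toNat := h1
  have h2' : c.toNat ≤ 90 := h2
  have hc : c = Char.ofNat c.toNat := (Char.ofNat_toNat c).symm
  interval_cases h : c.toNat <;> (rw [hc]; decide)

lemma mem_digits (c : Char) (h1 : '0' ≤ c) (h2 : c ≤ '9') :
    c ∈ (['0','1','2','3','4','5','6','7','8','9'] : List Char) := by
  have h1' : 48 ≤ c.toNat := h1
  have h2' : c.toNat ≤ 57 := h2
  have hc : c = Char.ofNat c.toNat := (Char.ofNat_toNat c).symm
  interval_cases h : c.toNat <;> (rw [hc]; decide)

lemma stepA_odd (acc : List Char × List Char × List Char × List Char) {c : Char}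
    (h : c ∈ oddChars) : stepA acc c = (acc.1, acc.2.1, acc.2.2.1 ++ [c], acc.2.2.2) := by
  fin_cases h
  · simp [stepA, show PySem.Int.ofStr? (String.mk ['1']) = some 1 from by decide]
  · simp [stepA, show PySem.Int.ofStr? (String.mk ['3']) = some 3 from by decide]
  · simp [stepA, show PySem.Int.ofStr? (String.mk ['5']) = some 5 from by decide]
  · simp [stepA, show PySem.Int.ofStr? (String.mk ['7']) = some 7 from by decide]
  · simp [stepA, show PySem.Int.ofStr? (String.mk ['9']) = some 9 from by decide]

lemma stepA_even (acc : List Char × List Char × List Char × List Char) {c : Char}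
    (h : c ∈ evenChars) : stepA acc c = (acc.1, acc.2.1, acc.2.2.1, acc.2.2.2 ++ [c]) := by
  fin_cases h
  · simp [stepA, show PySem.Int.ofStr? (String.mk ['0']) = some 0 from by decide]
  · simp [stepA, show PySem.Int.ofStr? (String.mk ['2']) = some 2 from by decide]
  · simp [stepA, show PySem.Int.ofStr? (String.mk ['4']) = some 4 from by decide]
  · simp [stepA, show PySem.Int.ofStr? (String.mk ['6']) = some 6 from by decide]
  · simp [stepA, show PySem.Int.ofStr? (String.mk ['8']) = some 8 from by decide]

lemma foldA_spec (cs : List Char) (lo up od ev : List Char)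
    (h : ∀ c ∈ cs, (97 ≤ c.toNat ∧ c.toNat ≤ 122) ∨ (65 ≤ c.toNat ∧ c.toNat ≤ 90)
      ∨ (48 ≤ c.toNat ∧ c.toNat ≤ 57)) :
    cs.foldl stepA (lo, up, od, ev) =
      (lo ++ cs.filter fL, up ++ cs.filter fU, od ++ cs.filter fO, ev ++ cs.filter fE) := by
  induction cs generalizing lo up od ev with
  | nil => simp
  | cons c cs ih =>
    have hc := h c (List.mem_cons_self ..)
    have htail : ∀ x ∈ cs, (97 ≤ x.toNat ∧ x.toNat ≤ 122) ∨ (65 ≤ x.toNat ∧ x.toNat ≤ 90)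
        ∨ (48 ≤ x.toNat ∧ x.toNat ≤ 57) :=
      fun x hx => h x (List.mem_cons_of_mem _ hx)
    simp only [List.foldl_cons]
    by_cases hl : 'a' ≤ c ∧ c ≤ 'z'
    · have hO : fO c = false := by
        simp only [fO, decide_eq_false_iff_not]
        intro hm; fin_cases hm <;> exact absurd hl.1 (by decide)
      have hE : fE c = false := by
        simp only [fE, decide_eq_false_iff_not]
        intro hm; fin_cases hm <;> exact absurd hl.1 (by decide)
      rw [show stepA (lo, up, od, ev) c = (lo ++ [c], up, od, ev) by simp [stepA, hl]]
      rw [ih _ _ _ _ htail]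
      simp [fL, fU, hl, hO, hE]
    · by_cases hu : 'A' ≤ c ∧ c ≤ 'Z'
      · have hO : fO c = false := by
          simp only [fO, decide_eq_false_iff_not]
          intro hm; fin_cases hm <;> exact absurd hu.1 (by decide)
        have hE : fE c = false := by
          simp only [fE, decide_eq_false_iff_not]
          intro hm; fin_cases hm <;> exact absurd hu.1 (by decide)
        rw [show stepA (lo, up, od, ev) c = (lo, up ++ [c], od, ev) by simp [stepA, hl, hu]]
        rw [ih _ _ _ _ htail]
        simp [fL, fU, hl, hu, hO, hE]
      · have hd : '0' ≤ c ∧ c ≤ '9' := by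
          rcases hc with h1 | h2 | h3
          · exact absurd (⟨h1.1, h1.2⟩ : 'a' ≤ c ∧ c ≤ 'z') hl
          · exact absurd (⟨h2.1, h2.2⟩ : 'A' ≤ c ∧ c ≤ 'Z') hu
          · exact ⟨h3.1, h3.2⟩
        have hmem := mem_digits c hd.1 hd.2
        fin_cases hmem <;>
        first
        | (rw [stepA_odd _ (by decide)]
           rw [ih _ _ _ _ htail]
           simp [fL, fU, fO, fE, oddChars, evenChars])
        | (rw [stepA_even _ (by decide)]
           rw [ih _ _ _ _ htail]
           simp [fL, fU, fO, fE, oddChars, evenChars])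

-- counting-sort characterisation of Python's sorted
lemma count_flatMap_replicate (alpha l : List Char) (a : Char) (hnd : alpha.Nodup) :
    (alpha.flatMap (fun c => List.replicate (l.count c) c)).count a
      = if a ∈ alpha then l.count a else 0 := by
  induction alpha with
  | nil => simp
  | cons c rest ih =>
    simp only [List.flatMap_cons, List.count_append, List.count_replicate]
    rcases List.nodup_cons.mp hnd with ⟨hcn, hrest⟩
    by_cases hca : c = a
    · subst hca
      have : c ∉ rest := hcn
      rw [ih hrest]
      simp [this]
    · rw [ih hrest]
      simp [List.mem_cons, hca, Ne.symm hca, beq_iff_eq]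

lemma pairwise_flatMap_replicate (alpha l : List Char) (h : alpha.Pairwise (· < ·)) :
    (alpha.flatMap (fun c => List.replicate (l.count c) c)).Pairwise (· ≤ ·) := by
  induction alpha with
  | nil => simp
  | cons c rest ih =>
    rcases List.pairwise_cons.mp h with ⟨hc, hrest⟩
    simp only [List.flatMap_cons]
    rw [List.pairwise_append]
    refine ⟨List.pairwise_replicate.mpr (Or.inr le_rfl), ih hrest, ?_⟩
    intro a ha b hb
    have ha' : a = c := List.eq_of_mem_replicate ha
    rcases List.mem_flatMap.mp hb with ⟨c', hc', hb'⟩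
    have hb'' : b = c' := List.eq_of_mem_replicate hb'
    subst ha'; subst hb''
    exact le_of_lt (hc _ hc')

lemma counting_sorted (alpha l : List Char) (hp : alpha.Pairwise (· < ·))
    (hsub : ∀ c ∈ l, c ∈ alpha) :
    PySem.List.sorted l (fun x => x) false
      = alpha.flatMap (fun c => List.replicate (l.count c) c) := by
  apply PySem.List.sorted_id_eq_of_perm_of_pairwise
  · rw [List.perm_iff_count]
    intro a
    rw [count_flatMap_replicate _ _ _ hp.nodup]
    by_cases ha : a ∈ alpha
    · simp [ha]
    · have : a ∉ l := fun hal => ha (hsub a hal)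
      simp [ha, List.count_eq_zero.mpr this]
  · exact pairwise_flatMap_replicate _ _ hp

lemma flatMap_count_filter (alpha : List Char) (f : Char → Bool) (cs : List Char)
    (h : ∀ c ∈ alpha, f c = true) :
    alpha.flatMap (fun c => List.replicate ((cs.filter f).count c) c)
      = alpha.flatMap (fun c => List.replicate (cs.count c) c) := by
  induction alpha with
  | nil => rfl
  | cons c rest ih =>
    simp only [List.flatMap_cons]
    rw [List.count_filter (h c (List.mem_cons_self ..)),
        ih (fun x hx => h x (List.mem_cons_of_mem _ hx))]

lemma group_eq (alpha : List Char) (f : Char → Bool) (cs : List Char)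
    (hp : alpha.Pairwise (· < ·))
    (hmem : ∀ c, f c = true → c ∈ alpha)
    (hval : ∀ c ∈ alpha, f c = true) :
    PySem.List.sorted (cs.filter f) (fun x => x) false
      = alpha.flatMap (fun c => List.replicate (cs.count c) c) := by
  rw [counting_sorted alpha _ hp (fun c hc => hmem c (List.of_mem_filter hc))]
  exact flatMap_count_filter alpha f cs hval

-- ===== VERDICT (by name: the statement is the Claim_ definition above) =====
set_option maxRecDepth 8192 in
theorem ginortS_spec : Claim_equal_ginortS := by
  intro s _ hpre
  have hpre' : ∀ c ∈ s.toList, (97 ≤ c.toNat ∧ c.toNat ≤ 122) ∨ (65 ≤ c.toNat ∧ c.toNat ≤ 90)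
      ∨ (48 ≤ c.toNat ∧ c.toNat ≤ 57) := by
    intro c hc
    have := List.all_eq_true.mp hpre c hc
    simpa [or_assoc] using this
  unfold Spec_ginortS ginortS ginortS_alt
  rw [foldA_spec s.toList [] [] [] [] hpre']
  rw [PySem.Dict.foldl_insert_getD_add_one_eq_counter]
  simp only [List.nil_append]
  have horder : ("abcdefghijklmnopqrstuvwxyz" ++ "ABCDEFGHIJKLMNOPQRSTUVWXYZ"
               ++ "13579" ++ "02468").toList = lowChars ++ upChars ++ oddChars ++ evenChars := by
    decide
  rw [horder]
  simp only [List.flatMap_append]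
  have hrep : ∀ (c : Char),
      List.replicate ((PySem.Dict.counter s.toList).getD c 0).toNat c
        = List.replicate (s.toList.count c) c := by
    intro c
    rw [PySem.Dict.getD_counter, Int.toNat_natCast]
  simp only [hrep]
  have gL := group_eq lowChars fL s.toList (by decide)
    (fun c hc => by
      have := of_decide_eq_true (by simpa [fL] using hc)
      exact mem_lowChars c this.1 this.2)
    (by intro c hc; fin_cases hc <;> rfl)
  have gU := group_eq upChars fU s.toList (by decide)
    (fun c hc => by
      have h2 : ('A' ≤ c ∧ c ≤ 'Z') := by
        simp only [fU, Bool.and_eq_true, decide_eq_true_eq] at hc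
        exact hc.2
      exact mem_upChars c h2.1 h2.2)
    (by intro c hc; fin_cases hc <;> rfl)
  have gO := group_eq oddChars fO s.toList (by decide)
    (fun c hc => of_decide_eq_true (by simpa [fO] using hc))
    (by intro c hc; fin_cases hc <;> rfl)
  have gE := group_eq evenChars fE s.toList (by decide)
    (fun c hc => of_decide_eq_true (by simpa [fE] using hc))
    (by intro c hc; fin_cases hc <;> rfl)
  rw [gL, gU, gO, gE]
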